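-- pv_equiv track=rewrite | github.com/SNEHIL0014/DealSignal-Pro | src/scorer.py | seniority_score
-- ===== SOURCE A (Python) =====
-- def seniority_score(title):
--     title = title.lower()
--     if any(k in title for k in ["ceo", "founder", "president"]):
--         return 100
--     elif "cto" in title:
--         return 80
--     elif "manager" in title:
--         return 60
--     else:
--         return 40
-- ===== SOURCE B (Python) =====
-- _SCORES = {"ceo": 100, "founder": 100, "president": 100, "cto": 80, "manager": 60}
--
-- def seniority_score(title):
--     t = title.lower()
--     return max((s for kw, s in _SCORES.items() if kw in t), default=40)
-- ===== Notes on version B (the rewrite author's own statement) =====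
-- stated objective: simpler
-- what changed: Replaced the if/elif early-return cascade with a keyword-to-score table and a single max reduction over the matching keywords (default 40); correct because the cascade's scores are monotone with its priority order.
import Mathlib
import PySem

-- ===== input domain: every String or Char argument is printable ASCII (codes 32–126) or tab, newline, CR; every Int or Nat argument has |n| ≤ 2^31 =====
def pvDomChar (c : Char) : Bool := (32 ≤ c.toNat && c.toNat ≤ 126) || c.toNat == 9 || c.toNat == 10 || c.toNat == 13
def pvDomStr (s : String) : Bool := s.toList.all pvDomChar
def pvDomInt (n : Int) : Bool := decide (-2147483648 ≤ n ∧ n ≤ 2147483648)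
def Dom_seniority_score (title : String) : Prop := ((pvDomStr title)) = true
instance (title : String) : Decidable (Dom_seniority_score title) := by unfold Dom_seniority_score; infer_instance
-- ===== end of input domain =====

-- B replaces A's if/elif cascade by a keyword→score table reduced with max (default 40): simpler, data-driven.


-- ===== PORT A =====
def seniority_score (title : String) : Int :=
  let title := PySem.Str.lower title
  if ["ceo", "founder", "president"].any (fun k => PySem.Str.isIn k title) then 100
  else if PySem.Str.isIn "cto" title then 80
  else if PySem.Str.isIn "manager" title then 60
  else 40

-- ===== PORT B =====
-- keyword → score table (the dict _SCORES in Source B, insertion order)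
def seniorityScores : List (String × Int) :=
  [("ceo", 100), ("founder", 100), ("president", 100), ("cto", 80), ("manager", 60)]

-- max(gen, default=40): max of the matching scores, 40 if none match
def seniority_score_alt (title : String) : Int :=
  let t := PySem.Str.lower title
  match (seniorityScores.filter (fun p => PySem.Str.isIn p.1 t)).map Prod.snd with
  | [] => 40
  | h :: rest => rest.foldl max h

-- ===== PRECONDITION & SPEC =====
def Spec_seniority_score (title : String) (out : Int) : Prop := out = seniority_score_alt title
instance (title : String) (out : Int) : Decidable (Spec_seniority_score title out) := by unfold Spec_seniority_score; infer_instance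

-- ===== CLAIM (what is proved, stated in full; the proofs are below) =====
def Claim_equal_seniority_score : Prop := ∀ (title : String), Dom_seniority_score title → Spec_seniority_score title (seniority_score title)

-- ===== LEMMAS AND PROOFS =====

-- ===== VERDICT (by name: the statement is the Claim_ definition above) =====
theorem seniority_score_spec : Claim_equal_seniority_score := by
  intro title _
  unfold Spec_seniority_score seniority_score seniority_score_alt seniorityScores
  by_cases h1 : PySem.Str.isIn "ceo" (PySem.Str.lower title) = true <;>
  by_cases h2 : PySem.Str.isIn "founder" (PySem.Str.lower title) = true <;>
  by_cases h3 : PySem.Str.isIn "president" (PySem.Str.lower title) = true <;>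
  by_cases h4 : PySem.Str.isIn "cto" (PySem.Str.lower title) = true <;>
  by_cases h5 : PySem.Str.isIn "manager" (PySem.Str.lower title) = true <;>
  simp at h1 h2 h3 h4 h5 <;>
  simp [List.filter, h1, h2, h3, h4, h5, List.any]
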